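-- pv_equiv track=rewrite | github.com/stenknutsen/HomeGrownPOSTagger | PhaseFourTagging.py | IN_able_UNK_PUNC_Tagger
-- ===== SOURCE A (Python) =====
-- def IN_able_UNK_PUNC_Tagger(sent):
--     sentToReturn = []
--     skip = 0
--
--     for i in range(len(sent)):
--
--         if skip>0:
--             skip = skip -1
--             continue
--
--
--         if (i)<0 | (i+3)>=len(sent):
--             sentToReturn += [sent[i]]
--             continue
--
--         leftContext = sent[i]
--         leftTarget = sent[i+1]
--         rightTarget = sent[i+2]
--         rightContext = sent[i+3]
--
--
--         if ((leftContext[1]=="IN"))&(leftTarget[1]=="UNK")&(leftTarget[0].endswith("ble"))&(rightTarget[1]=="UNK")&(rightContext[1]==","):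
--
--             sentToReturn += [leftContext]
--
--             newTup = (leftTarget[0], "J")
--             sentToReturn += [newTup]
--
--             newTup = (rightTarget[0], "N")
--             sentToReturn += [newTup]
--
--             sentToReturn += [rightContext]
--             skip = 3
--
--         else:
--             sentToReturn += [leftContext]
--
--     return sentToReturn
-- ===== SOURCE B (Python) =====
-- def IN_able_UNK_PUNC_Tagger(sent):
--     result = list(sent)
--     for i in range(len(sent) - 3):
--         if (sent[i][1] == "IN" and sent[i + 1][1] == "UNK"
--                 and sent[i + 1][0].endswith("ble")
--                 and sent[i + 2][1] == "UNK" and sent[i + 3][1] == ","):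
--             result[i + 1] = (sent[i + 1][0], "J")
--             result[i + 2] = (sent[i + 2][0], "N")
--     return result
-- ===== Notes on version B (the rewrite author's own statement) =====
-- stated objective: simpler
-- what changed: B replaces A's accumulate-with-skip-counter rebuild (appending tokens one by one and skipping 3 after a match) by a shallow copy of the input that is patched in place: one loop over the window starts overwrites only positions i+1 and i+2 on a match, relying on the fact that matchable windows cannot overlap.
import Mathlib
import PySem

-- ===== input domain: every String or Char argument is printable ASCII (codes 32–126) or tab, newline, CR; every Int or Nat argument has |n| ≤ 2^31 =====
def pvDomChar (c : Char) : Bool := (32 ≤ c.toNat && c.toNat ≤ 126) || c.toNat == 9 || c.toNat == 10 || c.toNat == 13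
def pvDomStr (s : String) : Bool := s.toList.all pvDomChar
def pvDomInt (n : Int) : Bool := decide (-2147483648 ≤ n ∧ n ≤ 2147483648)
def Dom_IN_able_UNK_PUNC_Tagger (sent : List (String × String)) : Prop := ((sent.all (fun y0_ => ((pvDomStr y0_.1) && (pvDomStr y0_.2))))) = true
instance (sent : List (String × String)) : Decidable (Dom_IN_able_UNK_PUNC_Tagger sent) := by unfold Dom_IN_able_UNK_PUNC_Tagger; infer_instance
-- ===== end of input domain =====

-- B replaces A's accumulate-with-skip-counter rebuild by a shallow copy patched in place
-- at the two retagged positions (matchable windows never overlap); objective: simpler.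


-- ===== PORT A =====
-- literal port of A: rebuild the sentence in an accumulator, with a skip counter;
-- Python's '(i)<0 | (i+3)>=len(sent)' is the chained comparison i < (0 | (i+3)) >= len(sent)
def IN_able_UNK_PUNC_Tagger (sent : List (String × String)) : List (String × String) :=
  ((PySem.List.pyRange 0 (sent.length : Int) 1).foldl
    (fun (st : List (String × String) × Int) (i : Int) =>
      if st.2 > 0 then (st.1, st.2 - 1)
      else if i < PySem.Int.bor 0 (i + 3) ∧ PySem.Int.bor 0 (i + 3) ≥ (sent.length : Int) then
        (st.1 ++ [PySem.List.pyGetD sent i ("", "")], st.2)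
      else
        let leftContext := PySem.List.pyGetD sent i ("", "")
        let leftTarget := PySem.List.pyGetD sent (i + 1) ("", "")
        let rightTarget := PySem.List.pyGetD sent (i + 2) ("", "")
        let rightContext := PySem.List.pyGetD sent (i + 3) ("", "")
        if (leftContext.2 == "IN") && (leftTarget.2 == "UNK")
            && PySem.Str.endswith leftTarget.1 "ble"
            && (rightTarget.2 == "UNK") && (rightContext.2 == ",") then
          (st.1 ++ [leftContext, (leftTarget.1, "J"), (rightTarget.1, "N"), rightContext], 3)
        else (st.1 ++ [leftContext], st.2))
    ([], 0)).1

-- ===== PORT B =====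
-- literal port of B (Source B): copy the list, patch positions i+1 and i+2 on a window match
def IN_able_UNK_PUNC_Tagger_alt (sent : List (String × String)) : List (String × String) :=
  (PySem.List.pyRange 0 ((sent.length : Int) - 3) 1).foldl
    (fun (result : List (String × String)) (i : Int) =>
      if ((PySem.List.pyGetD sent i ("", "")).2 == "IN")
          && ((PySem.List.pyGetD sent (i + 1) ("", "")).2 == "UNK")
          && PySem.Str.endswith (PySem.List.pyGetD sent (i + 1) ("", "")).1 "ble"
          && ((PySem.List.pyGetD sent (i + 2) ("", "")).2 == "UNK")
          && ((PySem.List.pyGetD sent (i + 3) ("", "")).2 == ",") then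
        PySem.List.pySetD
          (PySem.List.pySetD result (i + 1) ((PySem.List.pyGetD sent (i + 1) ("", "")).1, "J"))
          (i + 2) ((PySem.List.pyGetD sent (i + 2) ("", "")).1, "N")
      else result)
    sent

-- ===== PRECONDITION & SPEC =====
def Spec_IN_able_UNK_PUNC_Tagger (sent : List (String × String)) (out : List (String × String)) : Prop := out = IN_able_UNK_PUNC_Tagger_alt sent
instance (sent : List (String × String)) (out : List (String × String)) : Decidable (Spec_IN_able_UNK_PUNC_Tagger sent out) := by unfold Spec_IN_able_UNK_PUNC_Tagger; infer_instance

-- ===== CLAIM (what is proved, stated in full; the proofs are below) =====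
def Claim_equal_IN_able_UNK_PUNC_Tagger : Prop := ∀ (sent : List (String × String)), Dom_IN_able_UNK_PUNC_Tagger sent → Spec_IN_able_UNK_PUNC_Tagger sent (IN_able_UNK_PUNC_Tagger sent)

-- ===== LEMMAS AND PROOFS =====

-- the window predicate both programs test
def pvMatch (a b c d : String × String) : Bool :=
  (a.2 == "IN") && (b.2 == "UNK") && PySem.Str.endswith b.1 "ble"
    && (c.2 == "UNK") && (d.2 == ",")

-- the common reference result: rewrite the sentence suffix, consuming a matched
-- 4-window in one step (matched windows never overlap)
def pvGo : List (String × String) → List (String × String)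
  | a :: b :: c :: d :: rest =>
    if pvMatch a b c d then a :: (b.1, "J") :: (c.1, "N") :: d :: pvGo rest
    else a :: pvGo (b :: c :: d :: rest)
  | [] => []
  | [a] => [a]
  | [a, b] => [a, b]
  | [a, b, c] => [a, b, c]
termination_by xs => xs.length

lemma pvGo_short (s : List (String × String)) (h : s.length ≤ 3) : pvGo s = s := by
  match s with
  | [] => simp [pvGo]
  | [a] => simp [pvGo]
  | [a, b] => simp [pvGo]
  | [a, b, c] => simp [pvGo]
  | a :: b :: c :: d :: t => simp at h; omega

lemma pv_foldl_id {α β : Type} (l : List β) (f : α → β → α) (r : α)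
    (h : ∀ x ∈ l, f r x = r) : l.foldl f r = r := by
  induction l with
  | nil => rfl
  | cons x t ih =>
    simp only [List.foldl_cons, h x (by simp)]
    exact ih (fun y hy => h y (by simp [hy]))

lemma pv_skip3 {α β : Type} (f : α × Int → β → α × Int)
    (hf : ∀ st x, 0 < st.2 → f st x = (st.1, st.2 - 1)) (x y z : β) (l : List β) (A : α) :
    List.foldl f (A, 3) (x :: y :: z :: l) = List.foldl f (A, 0) l := by
  rw [List.foldl_cons, hf _ _ (by norm_num)]
  rw [List.foldl_cons, hf _ _ (by norm_num)]
  rw [List.foldl_cons, hf _ _ (by norm_num)]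
  norm_num

theorem A_loop (sent : List (String × String)) (k : Nat) : ∀ (i : Nat) (acc : List (String × String)),
    sent.length - i ≤ k →
    ((PySem.List.pyRange (i : Int) (sent.length : Int) 1).foldl
      (fun (st : List (String × String) × Int) (i : Int) =>
        if st.2 > 0 then (st.1, st.2 - 1)
        else if i < PySem.Int.bor 0 (i + 3) ∧ PySem.Int.bor 0 (i + 3) ≥ (sent.length : Int) then
          (st.1 ++ [PySem.List.pyGetD sent i ("", "")], st.2)
        else
          let leftContext := PySem.List.pyGetD sent i ("", "")
          let leftTarget := PySem.List.pyGetD sent (i + 1) ("", "")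
          let rightTarget := PySem.List.pyGetD sent (i + 2) ("", "")
          let rightContext := PySem.List.pyGetD sent (i + 3) ("", "")
          if (leftContext.2 == "IN") && (leftTarget.2 == "UNK")
              && PySem.Str.endswith leftTarget.1 "ble"
              && (rightTarget.2 == "UNK") && (rightContext.2 == ",") then
            (st.1 ++ [leftContext, (leftTarget.1, "J"), (rightTarget.1, "N"), rightContext], 3)
          else (st.1 ++ [leftContext], st.2))
      (acc, 0)) = (acc ++ pvGo (sent.drop i), 0) := by
  induction k with
  | zero =>
    intro i acc h
    have hin : sent.length ≤ i := by omega
    rw [PySem.List.pyRange_one_eq_nil (by omega), List.drop_eq_nil_of_le hin]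
    simp [pvGo]
  | succ k ih =>
    intro i acc h
    by_cases hin : sent.length ≤ i
    · rw [PySem.List.pyRange_one_eq_nil (by omega), List.drop_eq_nil_of_le hin]
      simp [pvGo]
    · rw [not_le] at hin
      have hbor : ∀ j : Int, PySem.Int.bor 0 j = j := fun j => by
        rw [PySem.Int.bor_comm, PySem.Int.bor_zero]
      simp only [hbor] at ih ⊢
      rw [PySem.List.pyRange_one_cons (by omega), List.foldl_cons]
      by_cases hsh : sent.length ≤ i + 3
      · -- short window: plain copy of sent[i]
        rw [if_neg (by omega), if_pos (by omega)]
        have c1 : ((i : Int) + 1) = ((i + 1 : Nat) : Int) := by push_cast; ring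
        rw [c1, ih (i + 1) _ (by omega)]
        simp only [PySem.List.pyGetD_natCast, List.getD_eq_getElem sent ("", "") hin]
        rw [pvGo_short _ (by simp; omega), pvGo_short _ (by simp; omega),
          List.drop_eq_getElem_cons hin]
        simp
      · rw [not_le] at hsh
        have h1 : i + 1 < sent.length := by omega
        have h2 : i + 1 + 1 < sent.length := by omega
        have h3 : i + 1 + 1 + 1 < sent.length := by omega
        have c1 : ((i : Int) + 1) = ((i + 1 : Nat) : Int) := by push_cast; ring
        have c2 : ((i : Int) + 2) = ((i + 1 + 1 : Nat) : Int) := by push_cast; ring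
        have c3 : ((i : Int) + 3) = ((i + 1 + 1 + 1 : Nat) : Int) := by push_cast; ring
        have hd : sent.drop i
            = sent[i] :: sent[i + 1] :: sent[i + 1 + 1] :: sent[i + 1 + 1 + 1]
              :: sent.drop (i + 1 + 1 + 1 + 1) := by
          rw [List.drop_eq_getElem_cons hin, List.drop_eq_getElem_cons h1,
            List.drop_eq_getElem_cons h2, List.drop_eq_getElem_cons h3]
        rw [if_neg (by omega), if_neg (by omega)]
        simp only [c1, c2, c3, PySem.List.pyGetD_natCast,
          List.getD_eq_getElem sent ("", "") hin, List.getD_eq_getElem sent ("", "") h1,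
          List.getD_eq_getElem sent ("", "") h2, List.getD_eq_getElem sent ("", "") h3]
        by_cases hm : pvMatch sent[i] sent[i + 1] sent[i + 1 + 1] sent[i + 1 + 1 + 1] = true
        · rw [if_pos (by simpa [pvMatch] using hm)]
          have e1 : ((i + 1 : Nat) : Int) + 1 = ((i + 1 + 1 : Nat) : Int) := by push_cast; ring
          have e2 : ((i + 1 + 1 : Nat) : Int) + 1 = ((i + 1 + 1 + 1 : Nat) : Int) := by
            push_cast; ring
          have e3 : ((i + 1 + 1 + 1 : Nat) : Int) + 1 = ((i + 1 + 1 + 1 + 1 : Nat) : Int) := by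
            push_cast; ring
          have hr : PySem.List.pyRange ((i + 1 : Nat) : Int) (sent.length : Int) 1
              = ((i + 1 : Nat) : Int) :: ((i + 1 + 1 : Nat) : Int) :: ((i + 1 + 1 + 1 : Nat) : Int)
                :: PySem.List.pyRange ((i + 1 + 1 + 1 + 1 : Nat) : Int) (sent.length : Int) 1 := by
            rw [PySem.List.pyRange_one_cons (by omega), e1,
              PySem.List.pyRange_one_cons (by omega), e2,
              PySem.List.pyRange_one_cons (by omega), e3]
          rw [hr, pv_skip3 _ (by intro st x hx; rw [if_pos hx]) _ _ _ _ _]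
          rw [ih (i + 1 + 1 + 1 + 1) _ (by omega), hd]
          simp only [pvGo]
          rw [if_pos hm]
          simp
        · rw [if_neg (by simpa [pvMatch] using hm)]
          rw [ih (i + 1) _ (by omega)]
          have hd1 : sent.drop (i + 1)
              = sent[i + 1] :: sent[i + 1 + 1] :: sent[i + 1 + 1 + 1]
                :: sent.drop (i + 1 + 1 + 1 + 1) := by
            rw [List.drop_eq_getElem_cons h1, List.drop_eq_getElem_cons h2,
              List.drop_eq_getElem_cons h3]
          rw [hd, hd1]
          simp only [pvGo]
          rw [if_neg hm]
          simp

lemma pv_patch {α : Type} (acc : List α) (a b c d : α) (rest : List α) (b' c' : α) (i : Nat)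
    (h : acc.length = i) :
    ((acc ++ a :: b :: c :: d :: rest).set (i + 1) b').set (i + 1 + 1) c'
      = acc ++ a :: b' :: c' :: d :: rest := by
  subst h
  induction acc with
  | nil => simp
  | cons x t ihp =>
    simp only [List.cons_append, List.length_cons]
    rw [show t.length + 1 + 1 = (t.length + 1) + 1 from rfl, List.set_cons_succ,
      show t.length + 1 + 1 + 1 = (t.length + 1 + 1) + 1 from rfl, List.set_cons_succ, ihp]

theorem B_loop (sent : List (String × String)) (k : Nat) : ∀ (i : Nat) (acc : List (String × String)),
    sent.length - i ≤ k → acc.length = i →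
    ((PySem.List.pyRange (i : Int) ((sent.length : Int) - 3) 1).foldl
      (fun (result : List (String × String)) (i : Int) =>
        if ((PySem.List.pyGetD sent i ("", "")).2 == "IN")
            && ((PySem.List.pyGetD sent (i + 1) ("", "")).2 == "UNK")
            && PySem.Str.endswith (PySem.List.pyGetD sent (i + 1) ("", "")).1 "ble"
            && ((PySem.List.pyGetD sent (i + 2) ("", "")).2 == "UNK")
            && ((PySem.List.pyGetD sent (i + 3) ("", "")).2 == ",") then
          PySem.List.pySetD
            (PySem.List.pySetD result (i + 1) ((PySem.List.pyGetD sent (i + 1) ("", "")).1, "J"))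
            (i + 2) ((PySem.List.pyGetD sent (i + 2) ("", "")).1, "N")
        else result)
      (acc ++ sent.drop i)) = acc ++ pvGo (sent.drop i) := by
  induction k with
  | zero =>
    intro i acc h _
    have hin : sent.length ≤ i := by omega
    rw [PySem.List.pyRange_one_eq_nil (by omega), List.drop_eq_nil_of_le hin]
    simp [pvGo]
  | succ k ih =>
    intro i acc h hacc
    by_cases hsh : sent.length ≤ i + 3
    · -- too close to the end: the loop range is empty and the suffix is short
      rw [PySem.List.pyRange_one_eq_nil (by omega), List.foldl_nil,
        pvGo_short _ (by simp; omega)]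
    · rw [not_le] at hsh
      have hin : i < sent.length := by omega
      have h1 : i + 1 < sent.length := by omega
      have h2 : i + 1 + 1 < sent.length := by omega
      have h3 : i + 1 + 1 + 1 < sent.length := by omega
      have c1 : ((i : Int) + 1) = ((i + 1 : Nat) : Int) := by push_cast; ring
      have c2 : ((i : Int) + 2) = ((i + 1 + 1 : Nat) : Int) := by push_cast; ring
      have c3 : ((i : Int) + 3) = ((i + 1 + 1 + 1 : Nat) : Int) := by push_cast; ring
      have hd : sent.drop i
          = sent[i] :: sent[i + 1] :: sent[i + 1 + 1] :: sent[i + 1 + 1 + 1]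
            :: sent.drop (i + 1 + 1 + 1 + 1) := by
        rw [List.drop_eq_getElem_cons hin, List.drop_eq_getElem_cons h1,
          List.drop_eq_getElem_cons h2, List.drop_eq_getElem_cons h3]
      have hd1 : sent.drop (i + 1)
          = sent[i + 1] :: sent[i + 1 + 1] :: sent[i + 1 + 1 + 1]
            :: sent.drop (i + 1 + 1 + 1 + 1) := by
        rw [List.drop_eq_getElem_cons h1, List.drop_eq_getElem_cons h2,
          List.drop_eq_getElem_cons h3]
      rw [PySem.List.pyRange_one_cons (by omega), List.foldl_cons]
      simp only [c1, c2, c3, PySem.List.pyGetD_natCast, PySem.List.pySetD_natCast,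
        List.getD_eq_getElem sent ("", "") hin, List.getD_eq_getElem sent ("", "") h1,
        List.getD_eq_getElem sent ("", "") h2, List.getD_eq_getElem sent ("", "") h3]
      by_cases hm : pvMatch sent[i] sent[i + 1] sent[i + 1 + 1] sent[i + 1 + 1 + 1] = true
      · rw [if_pos (by simpa [pvMatch] using hm)]
        have hmm := hm
        simp only [pvMatch, Bool.and_eq_true, beq_iff_eq] at hmm
        obtain ⟨⟨⟨⟨hA2, hB2⟩, hble⟩, hC2⟩, hD2⟩ := hmm
        rw [hd, pv_patch acc _ _ _ _ _ _ _ i hacc]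
        have hstate : acc ++ sent[i] :: (sent[i + 1].1, "J") :: (sent[i + 1 + 1].1, "N")
              :: sent[i + 1 + 1 + 1] :: sent.drop (i + 1 + 1 + 1 + 1)
            = (acc ++ [sent[i], (sent[i + 1].1, "J"), (sent[i + 1 + 1].1, "N"),
                sent[i + 1 + 1 + 1]]) ++ sent.drop (i + 1 + 1 + 1 + 1) := by simp
        rw [hstate]
        by_cases hlong : i + 1 + 1 + 1 + 1 + 3 ≤ sent.length
        · rw [PySem.List.pyRange_one_append ((i + 1 : Nat) : Int) ((i + 1 + 1 + 1 + 1 : Nat) : Int)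
            ((sent.length : Int) - 3) (by omega) (by omega), List.foldl_append]
          rw [pv_foldl_id (PySem.List.pyRange ((i + 1 : Nat) : Int)
            ((i + 1 + 1 + 1 + 1 : Nat) : Int) 1) _ _ ?_]
          · rw [ih (i + 1 + 1 + 1 + 1) _ (by omega) (by simp [hacc])]
            simp only [pvGo]
            rw [if_pos hm]
            simp
          · intro x hx
            rw [PySem.List.mem_pyRange_one] at hx
            have hx3 : x = ((i + 1 : Nat) : Int) ∨ x = ((i + 1 + 1 : Nat) : Int)
                ∨ x = ((i + 1 + 1 + 1 : Nat) : Int) := by omega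
            rcases hx3 with hx3 | hx3 | hx3 <;> subst hx3
            · exact if_neg (by
                simp only [PySem.List.pyGetD_natCast,
                  List.getD_eq_getElem sent ("", "") h1, hB2]
                simp)
            · exact if_neg (by
                simp only [PySem.List.pyGetD_natCast,
                  List.getD_eq_getElem sent ("", "") h2, hC2]
                simp)
            · exact if_neg (by
                simp only [PySem.List.pyGetD_natCast,
                  List.getD_eq_getElem sent ("", "") h3, hD2]
                simp)
        · rw [pv_foldl_id (PySem.List.pyRange ((i + 1 : Nat) : Int)
            ((sent.length : Int) - 3) 1) _ _ ?_]
          · simp only [pvGo]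
            rw [if_pos hm, pvGo_short _ (by simp; omega)]
            simp
          · intro x hx
            rw [PySem.List.mem_pyRange_one] at hx
            have hx3 : x = ((i + 1 : Nat) : Int) ∨ x = ((i + 1 + 1 : Nat) : Int)
                ∨ x = ((i + 1 + 1 + 1 : Nat) : Int) := by omega
            rcases hx3 with hx3 | hx3 | hx3 <;> subst hx3
            · exact if_neg (by
                simp only [PySem.List.pyGetD_natCast,
                  List.getD_eq_getElem sent ("", "") h1, hB2]
                simp)
            · exact if_neg (by
                simp only [PySem.List.pyGetD_natCast,
                  List.getD_eq_getElem sent ("", "") h2, hC2]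
                simp)
            · exact if_neg (by
                simp only [PySem.List.pyGetD_natCast,
                  List.getD_eq_getElem sent ("", "") h3, hD2]
                simp)
      · rw [if_neg (by simpa [pvMatch] using hm)]
        rw [show acc ++ sent.drop i = (acc ++ [sent[i]]) ++ sent.drop (i + 1) by
          rw [List.drop_eq_getElem_cons hin]; simp]
        rw [ih (i + 1) _ (by omega) (by simp [hacc])]
        rw [hd, hd1]
        simp only [pvGo]
        rw [if_neg hm]
        simp

-- ===== VERDICT (by name: the statement is the Claim_ definition above) =====
theorem IN_able_UNK_PUNC_Tagger_spec : Claim_equal_IN_able_UNK_PUNC_Tagger := by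
  intro sent _
  unfold Spec_IN_able_UNK_PUNC_Tagger IN_able_UNK_PUNC_Tagger IN_able_UNK_PUNC_Tagger_alt
  have hA := A_loop sent sent.length 0 [] (by omega)
  have hB := B_loop sent sent.length 0 [] (by omega) rfl
  simp only [Nat.cast_zero, List.drop_zero, List.nil_append] at hA hB
  rw [hA, hB]
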